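-- pv_equiv track=rewrite | github.com/ishaanbuildsthings/leetcode | problems/Leetcode/3814. Maximum Capacity Within Budget.py | maxCapacity
-- ===== SOURCE A (Python) =====
-- from typing import List
--
-- def maxCapacity(costs: List[int], capacity: List[int], budget: int) -> int:
--     budget -= 1
--     z = list(zip(costs, capacity))
--     z.sort()
--     pfMaxCap = [-1] * len(costs)
--     curr = -1
--     for i in range(len(costs)):
--         curr = max(curr, z[i][1])
--         pfMaxCap[i] = curr
--
--     res = 0
--     for i, (cost, cap) in enumerate(z):
--         if cost > budget:
--             break
--         remain = budget - cost
--         # bin search for rightmost cost we can take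
--         l = 0
--         r = i - 1
--         resI = None
--         while l <= r:
--             m = (r + l) // 2
--             if z[m][0] <= remain:
--                 resI = m
--                 l = m + 1
--             else:
--                 r = m - 1
--         if resI is None:
--             res = max(res, cap)
--             continue
--         res = max(res, cap + pfMaxCap[resI])
--
--     return res
-- ===== SOURCE B (Python) =====
-- def maxCapacity(costs, capacity, budget):
--     b = budget - 1
--     z = sorted(zip(costs, capacity))
--     res = 0
--     for i, (cost, cap) in enumerate(z):
--         if cost > b:
--             continue
--         remain = b - cost
--         found = False
--         best = -1
--         for c2, cap2 in z[:i]: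
--             if c2 <= remain:
--                 found = True
--                 best = max(best, cap2)
--         res = max(res, cap + best if found else cap)
--     return res
-- ===== Notes on version B (the rewrite author's own statement) =====
-- stated objective: simpler
-- what changed: Replaces A's prefix-max table plus hand-written binary search with a direct scan of the earlier (cheaper) sorted items for the best affordable partner, keeping only the sort and one running maximum.
import Mathlib
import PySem

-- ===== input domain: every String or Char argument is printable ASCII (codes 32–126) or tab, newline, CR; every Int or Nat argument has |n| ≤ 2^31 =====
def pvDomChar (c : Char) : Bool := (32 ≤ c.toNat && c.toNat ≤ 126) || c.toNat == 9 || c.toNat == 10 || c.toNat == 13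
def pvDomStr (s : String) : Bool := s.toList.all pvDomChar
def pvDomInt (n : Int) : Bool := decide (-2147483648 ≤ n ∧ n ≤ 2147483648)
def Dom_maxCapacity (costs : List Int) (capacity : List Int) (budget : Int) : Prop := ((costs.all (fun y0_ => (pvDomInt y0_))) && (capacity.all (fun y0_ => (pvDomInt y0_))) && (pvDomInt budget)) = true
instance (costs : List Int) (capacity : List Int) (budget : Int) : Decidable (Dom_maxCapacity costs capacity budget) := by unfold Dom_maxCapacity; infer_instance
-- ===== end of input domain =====

-- B replaces A's prefix-max table + binary search with a direct scan of the earlier sorted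
-- items for the best affordable partner: a simpler algorithm, not a faster one.

-- ===== PORT A =====
-- A: sort (cost, cap) pairs, build a prefix-max capacity table, and for each affordable
-- item binary-search the rightmost affordable partner strictly before it.

-- A-side helper: the hand-written binary search (while l <= r … on z[m][0])
def binSearchA (z : List (Int × Int)) (remain : Int) (l r : Int) (resI : Option Int) : Option Int :=
  if h : l ≤ r then
    let m := PySem.Int.floordiv (r + l) 2
    if (PySem.List.pyGetD z m ((0 : Int), (0 : Int))).1 ≤ remain then
      binSearchA z remain (m + 1) r (some m)
    else
      binSearchA z remain l (m - 1) resI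
  else resI
termination_by (r + 1 - l).toNat
decreasing_by
  · have hb := PySem.Int.floordiv_two_mid_bounds (lo := l) (hi := r) h
    rw [Int.add_comm l r] at hb
    omega
  · have hb := PySem.Int.floordiv_two_mid_bounds (lo := l) (hi := r) h
    rw [Int.add_comm l r] at hb
    omega

-- A-side helper: one step of the pfMaxCap-building loop
def aPfStep (z : List (Int × Int)) (st : Int × List Int) (i : Int) : Int × List Int :=
  let curr := max st.1 (PySem.List.pyGetD z i ((0 : Int), (0 : Int))).2
  (curr, st.2 ++ [curr])

-- A-side helper: the main enumerate loop (recursion because of the `break`)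
def aLoopA (z : List (Int × Int)) (pf : List Int) (b : Int) :
    List (Int × (Int × Int)) → Int → Int
  | [], res => res
  | ip :: rest, res =>
    if ip.2.1 > b then res
    else
      let remain := b - ip.2.1
      match binSearchA z remain 0 (ip.1 - 1) none with
      | none => aLoopA z pf b rest (max res ip.2.2)
      | some m => aLoopA z pf b rest (max res (ip.2.2 + PySem.List.pyGetD pf m (-1)))

def maxCapacity (costs : List Int) (capacity : List Int) (budget : Int) : Int :=
  let b := budget - 1
  let z := PySem.List.sorted2 (costs.zip capacity) (fun p => p.1) (fun p => p.2)
  let pf := ((PySem.List.pyRange 0 (costs.length : Int) 1).foldl (aPfStep z) (-1, [])).2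
  aLoopA z pf b (PySem.List.enumerate z 0) 0

-- ===== PORT B =====
-- B: same sort, then for each affordable item a direct scan of the earlier items for the
-- best affordable partner — no prefix table, no binary search (simpler, not faster).

-- B-side helper: inner scan over z[:i] tracking (found, best)
def bScanStep (remain : Int) (st : Bool × Int) (p : Int × Int) : Bool × Int :=
  if p.1 ≤ remain then (true, max st.2 p.2) else st

-- B-side helper: one step of the outer fold
def bStep (z : List (Int × Int)) (b : Int) (res : Int) (ip : Int × (Int × Int)) : Int :=
  if ip.2.1 > b then res
  else
    let remain := b - ip.2.1
    let st := (PySem.List.slice z none (some ip.1)).foldl (bScanStep remain) (false, -1)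
    max res (if st.1 then ip.2.2 + st.2 else ip.2.2)

def maxCapacity_alt (costs : List Int) (capacity : List Int) (budget : Int) : Int :=
  let b := budget - 1
  let z := PySem.List.sorted2 (costs.zip capacity) (fun p => p.1) (fun p => p.2)
  (PySem.List.enumerate z 0).foldl (bStep z b) 0

-- ===== PRECONDITION & SPEC =====
-- Pre_ excludes only len(costs) > len(capacity): zip truncates, so A's first loop then
-- indexes z past its end and raises IndexError.
def Pre_maxCapacity (costs : List Int) (capacity : List Int) (budget : Int) : Prop :=
  costs.length ≤ capacity.length
instance (costs : List Int) (capacity : List Int) (budget : Int) :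
    Decidable (Pre_maxCapacity costs capacity budget) := by unfold Pre_maxCapacity; infer_instance

def pvWitness_maxCapacity : List Int × List Int × Int := ([3, 1, 4], [5, 2, 7], 6)

def Spec_maxCapacity (costs : List Int) (capacity : List Int) (budget : Int) (out : Int) : Prop := out = maxCapacity_alt costs capacity budget
instance (costs : List Int) (capacity : List Int) (budget : Int) (out : Int) : Decidable (Spec_maxCapacity costs capacity budget out) := by unfold Spec_maxCapacity; infer_instance

-- ===== CLAIM (what is proved, stated in full; the proofs are below) =====
def Claim_equal_maxCapacity : Prop := ∀ (costs : List Int) (capacity : List Int) (budget : Int), Dom_maxCapacity costs capacity budget → Pre_maxCapacity costs capacity budget → Spec_maxCapacity costs capacity budget (maxCapacity costs capacity budget)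

-- ===== LEMMAS AND PROOFS =====

-- the best capacity among the first n sorted items, floored at -1 (A's pfMaxCap entries)
def prefBest (z : List (Int × Int)) (n : Nat) : Int :=
  (z.take n).foldl (fun a p => max a p.2) (-1)

-- z's costs are nondecreasing after the lexicographic sort
lemma sorted2_fst_pairwise (xs : List (Int × Int)) :
    (PySem.List.sorted2 xs (fun p => p.1) (fun p => p.2)).Pairwise
      (fun a b => a.1 ≤ b.1) := by
  have hins : ∀ (x : Int × Int) (ys : List (Int × Int)),
      ys.Pairwise (fun a b => a.1 ≤ b.1) →
      (PySem.List.insertBy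
        (fun a b => decide (a.1 < b.1) || (!decide (b.1 < a.1) && decide (a.2 < b.2)))
        x ys).Pairwise (fun a b => a.1 ≤ b.1) := by
    intro x ys hp
    induction ys with
    | nil => simp [PySem.List.insertBy]
    | cons y t ih =>
      rw [List.pairwise_cons] at hp
      by_cases hb : (decide (x.1 < y.1) || (!decide (y.1 < x.1) && decide (x.2 < y.2))) = true
      · rw [PySem.List.insertBy, if_pos hb]
        simp only [Bool.or_eq_true, Bool.and_eq_true, decide_eq_true_eq,
          Bool.not_eq_true', decide_eq_false_iff_not] at hb
        have hxy : x.1 ≤ y.1 := by rcases hb with h1 | ⟨h1, _⟩ <;> omega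
        refine List.pairwise_cons.2 ⟨?_, List.pairwise_cons.2 ⟨hp.1, hp.2⟩⟩
        intro q hq
        rcases List.mem_cons.1 hq with rfl | hq
        · exact hxy
        · exact le_trans hxy (hp.1 q hq)
      · rw [PySem.List.insertBy, if_neg hb]
        simp only [Bool.or_eq_true, Bool.and_eq_true, decide_eq_true_eq,
          Bool.not_eq_true', decide_eq_false_iff_not, not_or, not_and] at hb
        have hyx : y.1 ≤ x.1 := by omega
        refine List.pairwise_cons.2 ⟨?_, ih hp.2⟩
        intro q hq
        rcases (PySem.List.insertBy_mem_iff _ _ _ _).1 hq with rfl | hq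
        · exact hyx
        · exact hp.1 q hq
  have main : ∀ (l acc : List (Int × Int)),
      acc.Pairwise (fun a b => a.1 ≤ b.1) →
      (l.foldl (fun acc x => PySem.List.insertBy
        (fun a b => decide (a.1 < b.1) || (!decide (b.1 < a.1) && decide (a.2 < b.2)))
        x acc) acc).Pairwise (fun a b => a.1 ≤ b.1) := by
    intro l
    induction l with
    | nil => intro acc h; exact h
    | cons x t ih => intro acc h; exact ih _ (hins x acc h)
  exact main xs [] (by simp)

-- the pfMaxCap-building fold, characterised
lemma pf_spec (z : List (Int × Int)) (N : Nat) (hN : N ≤ z.length) :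
    (PySem.List.pyRange 0 (N : Int) 1).foldl (aPfStep z) (-1, []) =
      (prefBest z N, (List.range N).map (fun t => prefBest z (t + 1))) := by
  induction N with
  | zero =>
    rw [show ((0 : Nat) : Int) = 0 by rfl, PySem.List.pyRange_one_eq_nil le_rfl]
    rfl
  | succ n ih =>
    have hn : n ≤ z.length := Nat.le_of_succ_le hN
    have hlt : n < z.length := hN
    rw [show ((n + 1 : Nat) : Int) = (n : Int) + 1 by push_cast; ring,
      PySem.List.pyRange_one_succ_right (by positivity), List.foldl_append, ih hn]
    have hget : (PySem.List.pyGetD z (n : Int) ((0 : Int), (0 : Int))).2 = (z[n]'hlt).2 := by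
      rw [PySem.List.pyGetD_natCast, List.getD_eq_getElem?_getD, List.getElem?_eq_getElem hlt]
      rfl
    have hpb : prefBest z (n + 1) = max (prefBest z n) (z[n]'hlt).2 := by
      unfold prefBest
      rw [List.take_add_one, List.getElem?_eq_getElem hlt, Option.toList_some,
        List.foldl_append, List.foldl_cons, List.foldl_nil]
    simp only [List.foldl_cons, List.foldl_nil, aPfStep, hget, List.range_succ, List.map_append,
      List.map_cons, List.map_nil, hpb]

-- binary-search characterisation
lemma binSearchA_spec (z : List (Int × Int)) (remain : Int)
    (hz : ∀ (i j : Nat) (hij : i ≤ j) (hj : j < z.length),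
      (z[i]'(Nat.lt_of_le_of_lt hij hj)).1 ≤ (z[j]'hj).1)
    (k : Nat) (hk : k ≤ z.length) (l r : Int) (acc : Option Int) :
    0 ≤ l → l ≤ (k : Int) → r < (k : Int) →
    (∀ j : Nat, (j : Int) < l → ∀ hj : j < z.length, (z[j]'hj).1 ≤ remain) →
    (∀ j : Nat, r < (j : Int) → j < k → ∀ hj : j < z.length, remain < (z[j]'hj).1) →
    (acc = none → l = 0) →
    (∀ m, acc = some m → m = l - 1 ∧ 1 ≤ l) →
    ((binSearchA z remain l r acc = none →
        ∀ j : Nat, j < k → ∀ hj : j < z.length, remain < (z[j]'hj).1) ∧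
      (∀ m, binSearchA z remain l r acc = some m →
        ∃ mn : Nat, m = (mn : Int) ∧ mn < k ∧
          (∃ hm : mn < z.length, (z[mn]'hm).1 ≤ remain) ∧
          ∀ j : Nat, mn < j → j < k → ∀ hj : j < z.length, remain < (z[j]'hj).1)) := by
  fun_induction binSearchA z remain l r acc with
  | case1 l r acc h m hcond ih =>
    intro h0 hlk hrk Hb Ha _Hn _Hs
    have hb : l ≤ m ∧ m ≤ r := by
      have hb0 := PySem.Int.floordiv_two_mid_bounds (lo := l) (hi := r) h
      rw [Int.add_comm l r] at hb0
      exact hb0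
    have hzlen : (z.length : Int) ≥ (k : Int) := by exact_mod_cast Int.ofNat_le.2 hk
    have hmlen : m < (z.length : Int) := by omega
    have hmnat : m.toNat < z.length := by omega
    rw [PySem.List.pyGetD_eq_getElem z ((0 : Int), (0 : Int)) (by omega) hmlen] at hcond
    refine ih (by omega) (by omega) hrk ?_ Ha (by simp) ?_
    · intro j hj hjz
      have hjm : j ≤ m.toNat := by omega
      exact le_trans (hz j m.toNat hjm hmnat) hcond
    · intro m1 hm1
      injection hm1 with hm1
      constructor
      · omega
      · omega
  | case2 l r acc h m hcond ih =>
    intro h0 hlk hrk Hb Ha Hn Hs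
    have hb : l ≤ m ∧ m ≤ r := by
      have hb0 := PySem.Int.floordiv_two_mid_bounds (lo := l) (hi := r) h
      rw [Int.add_comm l r] at hb0
      exact hb0
    have hzlen : (z.length : Int) ≥ (k : Int) := by exact_mod_cast Int.ofNat_le.2 hk
    have hmlen : m < (z.length : Int) := by omega
    have hmnat : m.toNat < z.length := by omega
    rw [PySem.List.pyGetD_eq_getElem z ((0 : Int), (0 : Int)) (by omega) hmlen] at hcond
    push Not at hcond
    refine ih h0 hlk (by omega) Hb ?_ Hn Hs
    intro j hj hjk hjz
    have hmj : m.toNat ≤ j := by omega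
    exact lt_of_lt_of_le hcond (hz m.toNat j hmj hjz)
  | case3 l r acc h =>
    intro h0 hlk hrk Hb Ha Hn Hs
    constructor
    · intro hacc j hjk hjz
      have hl0 : l = 0 := Hn hacc
      exact Ha j (by omega) hjk hjz
    · intro m hacc
      obtain ⟨hm1, hm2⟩ := Hs m hacc
      have hmn : ((l - 1).toNat : Int) = l - 1 := Int.toNat_of_nonneg (by omega)
      refine ⟨(l - 1).toNat, by omega, by omega, ⟨by omega, ?_⟩, ?_⟩
      · exact Hb (l - 1).toNat (by omega) (by omega)
      · intro j hj hjk hjz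
        exact Ha j (by omega) hjk hjz

-- inner scan: an all-affordable block, starting from found = true
lemma scan_aff (remain : Int) (xs : List (Int × Int)) (v : Int)
    (h : ∀ p ∈ xs, p.1 ≤ remain) :
    xs.foldl (bScanStep remain) (true, v) =
      (true, xs.foldl (fun a p => max a p.2) v) := by
  induction xs generalizing v with
  | nil => rfl
  | cons p t ih =>
    simp only [List.foldl_cons, bScanStep, if_pos (h p (by simp))]
    exact ih _ (fun q hq => h q (by simp [hq]))

-- inner scan: a nonempty all-affordable block from the initial (false, -1) state
lemma scan_aff_start (remain : Int) (xs : List (Int × Int)) (v : Int)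
    (h : ∀ p ∈ xs, p.1 ≤ remain) (hne : xs ≠ []) :
    xs.foldl (bScanStep remain) (false, v) =
      (true, xs.foldl (fun a p => max a p.2) v) := by
  cases xs with
  | nil => exact absurd rfl hne
  | cons p t =>
    have hp : p.1 ≤ remain := h p (by simp)
    simp only [List.foldl_cons, bScanStep, if_pos hp]
    exact scan_aff remain t (max v p.2) (fun q hq => h q (by simp [hq]))

-- inner scan: an all-unaffordable block changes nothing
lemma scan_unaff (remain : Int) (xs : List (Int × Int)) (st : Bool × Int)
    (h : ∀ p ∈ xs, remain < p.1) :
    xs.foldl (bScanStep remain) st = st := by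
  induction xs with
  | nil => rfl
  | cons p t ih =>
    have hp : ¬ p.1 ≤ remain := by have := h p (by simp); omega
    simp only [List.foldl_cons, bScanStep, if_neg hp]
    exact ih (fun q hq => h q (by simp [hq]))

-- outer fold of B over items that are all over budget changes nothing
lemma bfold_skip (z : List (Int × Int)) (b : Int) (l : List (Int × (Int × Int))) (res : Int)
    (h : ∀ ip ∈ l, b < ip.2.1) :
    l.foldl (bStep z b) res = res := by
  induction l with
  | nil => rfl
  | cons ip t ih =>
    have hp : ip.2.1 > b := h ip (by simp)
    simp only [List.foldl_cons, bStep, if_pos hp]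
    exact ih (fun q hq => h q (by simp [hq]))

-- A's break-loop equals B's skip-fold on the common sorted suffix
lemma loop_eq (z : List (Int × Int)) (pf : List Int) (b : Int)
    (hz : ∀ (i j : Nat) (hij : i ≤ j) (hj : j < z.length),
      (z[i]'(Nat.lt_of_le_of_lt hij hj)).1 ≤ (z[j]'hj).1)
    (hpf : pf = (List.range z.length).map (fun t => prefBest z (t + 1))) :
    ∀ (k : Nat), k ≤ z.length → ∀ res : Int,
      aLoopA z pf b (PySem.List.enumerate (z.drop k) (k : Int)) res =
        (PySem.List.enumerate (z.drop k) (k : Int)).foldl (bStep z b) res := by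
  have hpflen : pf.length = z.length := by simp [hpf]
  suffices H : ∀ (fuel k : Nat), z.length - k = fuel → k ≤ z.length → ∀ res : Int,
      aLoopA z pf b (PySem.List.enumerate (z.drop k) (k : Int)) res =
        (PySem.List.enumerate (z.drop k) (k : Int)).foldl (bStep z b) res by
    intro k hk res
    exact H (z.length - k) k rfl hk res
  intro fuel
  induction fuel with
  | zero =>
    intro k hfuel hk res
    have hkz : k = z.length := by omega
    rw [List.drop_eq_nil_of_le (by omega)]
    rfl
  | succ f ih =>
    intro k hfuel hk res
    have hklt : k < z.length := by omega
    rw [List.drop_eq_getElem_cons hklt, PySem.List.enumerate_cons]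
    by_cases hcost : (z[k]'hklt).1 > b
    · -- A breaks; B skips every remaining item because costs are nondecreasing
      rw [show aLoopA z pf b (((k : Int), z[k]'hklt) ::
          PySem.List.enumerate (z.drop (k + 1)) ((k : Int) + 1)) res = res by
        simp only [aLoopA]; rw [if_pos hcost]]
      rw [List.foldl_cons, show bStep z b res ((k : Int), z[k]'hklt) = res by
        simp only [bStep]; rw [if_pos hcost]]
      rw [bfold_skip]
      intro ip hip
      rcases (PySem.List.mem_enumerate_iff _ _ _).1 hip with ⟨t, ht, rfl⟩
      have : (z.drop (k + 1))[t] = z[k + 1 + t]'(by simp at ht; omega) := List.getElem_drop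
      simp only [this]
      exact lt_of_lt_of_le hcost (hz k (k + 1 + t) (by omega) (by simp at ht; omega))
    · -- both take the item; the candidates agree
      have hspec := binSearchA_spec z (b - (z[k]'hklt).1) hz k (le_of_lt hklt)
        0 ((k : Int) - 1) none le_rfl (by omega) (by omega)
        (by intro j hj hjz; omega)
        (by intro j hj hjk hjz; omega)
        (fun _ => rfl) (by simp)
      have hslice : PySem.List.slice z none (some ((k : Int))) = z.take k :=
        PySem.List.slice_to_natCast z k
      have hstep : bStep z b res ((k : Int), z[k]'hklt) =
          (match binSearchA z (b - (z[k]'hklt).1) 0 ((k : Int) - 1) none with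
            | none => max res (z[k]'hklt).2
            | some m => max res ((z[k]'hklt).2 + PySem.List.pyGetD pf m (-1))) := by
        cases hbs : binSearchA z (b - (z[k]'hklt).1) 0 ((k : Int) - 1) none with
        | none =>
          have hall : ∀ p ∈ z.take k, b - (z[k]'hklt).1 < p.1 := by
            intro p hp
            rcases List.mem_iff_getElem.1 hp with ⟨t, ht, rfl⟩
            have ht' : t < k := by simp at ht; omega
            rw [List.getElem_take]
            exact hspec.1 hbs t ht' (by omega)
          simp only [bStep, if_neg hcost, hslice]
          rw [scan_unaff _ _ _ hall]
          simp
        | some m =>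
          rcases hspec.2 m hbs with ⟨mn, rfl, hmnk, ⟨hmlen, haff⟩, habove⟩
          have htk : z.take k = z.take (mn + 1) ++ (z.take k).drop (mn + 1) := by
            conv_lhs => rw [← List.take_append_drop (mn + 1) (z.take k)]
            rw [List.take_take, Nat.min_eq_left (by omega)]
          have hfirst : ∀ p ∈ z.take (mn + 1), p.1 ≤ b - (z[k]'hklt).1 := by
            intro p hp
            rcases List.mem_iff_getElem.1 hp with ⟨t, ht, rfl⟩
            have ht' : t ≤ mn := by simp at ht; omega
            rw [List.getElem_take]
            exact le_trans (hz t mn ht' hmlen) haff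
          have hsecond : ∀ p ∈ (z.take k).drop (mn + 1), b - (z[k]'hklt).1 < p.1 := by
            intro p hp
            rcases List.mem_iff_getElem.1 hp with ⟨t, ht, rfl⟩
            have htlen : mn + 1 + t < k := by
              simp [List.length_drop, List.length_take] at ht; omega
            rw [List.getElem_drop, List.getElem_take]
            exact habove (mn + 1 + t) (by omega) htlen (by omega)
          have hne : z.take (mn + 1) ≠ [] := by
            have : (z.take (mn + 1)).length = mn + 1 := by
              rw [List.length_take]; omega
            intro hcon; rw [hcon] at this; simp at this
          have hpfval : PySem.List.pyGetD pf ((mn : Nat) : Int) (-1) = prefBest z (mn + 1) := by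
            rw [PySem.List.pyGetD_natCast, hpf]
            rw [List.getD_eq_getElem?_getD, List.getElem?_eq_getElem (by simp; omega)]
            simp
          simp only [bStep, if_neg hcost, hslice]
          rw [htk, List.foldl_append, scan_aff_start _ _ _ hfirst hne,
            scan_unaff _ _ _ hsecond, hpfval]
          simp [prefBest]
      rw [List.foldl_cons, hstep]
      have hrec : ∀ newres : Int,
          aLoopA z pf b (PySem.List.enumerate (z.drop (k + 1)) ((k : Int) + 1)) newres =
            (PySem.List.enumerate (z.drop (k + 1)) ((k : Int) + 1)).foldl (bStep z b) newres := by
        intro newres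
        have := ih (k + 1) (by omega) (by omega) newres
        rwa [show (((k + 1 : Nat)) : Int) = (k : Int) + 1 by push_cast; ring] at this
      cases hbs : binSearchA z (b - (z[k]'hklt).1) 0 ((k : Int) - 1) none with
      | none =>
        rw [show aLoopA z pf b (((k : Int), z[k]'hklt) ::
            PySem.List.enumerate (z.drop (k + 1)) ((k : Int) + 1)) res =
            aLoopA z pf b (PySem.List.enumerate (z.drop (k + 1)) ((k : Int) + 1))
              (max res (z[k]'hklt).2) by
          simp only [aLoopA]; rw [if_neg hcost, hbs]]
        rw [hrec]
      | some m =>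
        rw [show aLoopA z pf b (((k : Int), z[k]'hklt) ::
            PySem.List.enumerate (z.drop (k + 1)) ((k : Int) + 1)) res =
            aLoopA z pf b (PySem.List.enumerate (z.drop (k + 1)) ((k : Int) + 1))
              (max res ((z[k]'hklt).2 + PySem.List.pyGetD pf m (-1))) by
          simp only [aLoopA]; rw [if_neg hcost, hbs]]
        rw [hrec]

-- ===== VERDICT (by name: the statement is the Claim_ definition above) =====
theorem maxCapacity_spec : Claim_equal_maxCapacity := by
  intro costs capacity budget _hdom hpre
  unfold Pre_maxCapacity at hpre
  unfold Spec_maxCapacity maxCapacity maxCapacity_alt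
  simp only []
  set z := PySem.List.sorted2 (costs.zip capacity) (fun p => p.1) (fun p => p.2) with hzdef
  have hlen : z.length = costs.length := by
    rw [(PySem.List.sorted2_perm (costs.zip capacity) _ _ false).length_eq,
      List.length_zip, Nat.min_eq_left hpre]
  have hz : ∀ (i j : Nat) (hij : i ≤ j) (hj : j < z.length),
      (z[i]'(Nat.lt_of_le_of_lt hij hj)).1 ≤ (z[j]'hj).1 := by
    intro i j hij hj
    rcases Nat.lt_or_ge i j with hlt | hge
    · exact List.pairwise_iff_getElem.1 (sorted2_fst_pairwise (costs.zip capacity)) i j _ hj hlt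
    · have : i = j := by omega
      subst this; exact le_rfl
  have hpf : ((PySem.List.pyRange 0 (costs.length : Int) 1).foldl (aPfStep z) (-1, [])).2 =
      (List.range z.length).map (fun t => prefBest z (t + 1)) := by
    rw [← hlen, pf_spec z z.length le_rfl]
  rw [hpf]
  have := loop_eq z ((List.range z.length).map (fun t => prefBest z (t + 1))) (budget - 1)
    hz rfl 0 (Nat.zero_le _) 0
  simpa using this
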